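-- pv_equiv track=rewrite | github.com/vinyeee/Algorithm | 241223/DateTime to DateTime/datetime-to-datetime.py | elapsed_time
-- ===== SOURCE A (Python) =====
-- def elapsed_time(d2, h2 ,m2):
--
--     d1, h1 ,m1 = 11, 11, 11
--
--     t = 0
--     while True:
--
--         if d1 > d2 or (d1 == d2 and h1 > h2 ) or (d1 == d2 and h1 == h2 and m1 > m2):
--             return -1
--
--         if d1 == d2 and h1 == h2 and m1 == m2:
--             return(t)
--
--         t += 1
--         m1 += 1
--
--         if m1 >= 60:
--             h1 += 1
--             m1 = 0
--             if h1 >= 24: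
--                 d1 += 1
--                 h1 = 0
-- ===== SOURCE B (Python) =====
-- def elapsed_time(d2, h2, m2):
--     # Closed form: total minutes from the fixed start (day 11, 11:11).
--     # -1 when the target is not a valid clock time or lies before the start.
--     if 0 <= h2 < 24 and 0 <= m2 < 60:
--         t = (d2 * 1440 + h2 * 60 + m2) - (11 * 1440 + 11 * 60 + 11)
--         if t >= 0:
--             return t
--     return -1
-- ===== Notes on version B (the rewrite author's own statement) =====
-- stated objective: faster
-- what changed: Replaces the minute-by-minute simulation loop with a closed-form validity check plus a total-minutes subtraction.
import Mathlib
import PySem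

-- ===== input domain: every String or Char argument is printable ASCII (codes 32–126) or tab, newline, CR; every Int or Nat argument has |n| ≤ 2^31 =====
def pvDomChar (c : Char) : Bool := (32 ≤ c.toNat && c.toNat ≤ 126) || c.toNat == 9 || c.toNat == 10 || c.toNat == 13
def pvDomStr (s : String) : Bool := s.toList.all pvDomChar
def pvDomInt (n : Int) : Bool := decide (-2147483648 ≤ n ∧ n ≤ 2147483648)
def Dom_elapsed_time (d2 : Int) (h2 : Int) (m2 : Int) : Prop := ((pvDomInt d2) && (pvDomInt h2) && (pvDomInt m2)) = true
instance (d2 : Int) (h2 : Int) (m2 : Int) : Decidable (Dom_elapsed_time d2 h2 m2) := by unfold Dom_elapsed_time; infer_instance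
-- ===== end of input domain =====

-- B replaces A's minute-by-minute simulation with a closed-form total-minutes subtraction (O(1) vs O(elapsed)).


-- ===== PORT A =====
-- A's 'while True' loop, transliterated; the Nat fuel only makes the recursion
-- structural (A always returns; the fuel chosen below is proved sufficient, the
-- fuel-0 branch is unreachable on every input).
def elapsedLoopA (fuel : Nat) (d1 h1 m1 t : Int) (d2 h2 m2 : Int) : Int :=
  match fuel with
  | 0 => -1  -- unreachable: see lemma elapsedLoopA_eq
  | fuel + 1 =>
    if d1 > d2 ∨ (d1 = d2 ∧ h1 > h2) ∨ (d1 = d2 ∧ h1 = h2 ∧ m1 > m2) then -1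
    else if d1 = d2 ∧ h1 = h2 ∧ m1 = m2 then t
    else if m1 + 1 ≥ 60 then     -- t += 1; m1 += 1; rollover inlined
      if h1 + 1 ≥ 24 then elapsedLoopA fuel (d1 + 1) 0 0 (t + 1) d2 h2 m2
      else elapsedLoopA fuel d1 (h1 + 1) 0 (t + 1) d2 h2 m2
    else elapsedLoopA fuel d1 h1 (m1 + 1) (t + 1) d2 h2 m2

def elapsed_time (d2 : Int) (h2 : Int) (m2 : Int) : Int :=
  elapsedLoopA ((d2.toNat + 2) * 1440) 11 11 11 0 d2 h2 m2

-- ===== PORT B =====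
def elapsed_time_alt (d2 : Int) (h2 : Int) (m2 : Int) : Int :=
  if 0 ≤ h2 ∧ h2 < 24 ∧ 0 ≤ m2 ∧ m2 < 60 then
    let t := (d2 * 1440 + h2 * 60 + m2) - (11 * 1440 + 11 * 60 + 11)
    if t ≥ 0 then t else -1
  else -1

-- ===== PRECONDITION & SPEC =====
def Spec_elapsed_time (d2 : Int) (h2 : Int) (m2 : Int) (out : Int) : Prop := out = elapsed_time_alt d2 h2 m2
instance (d2 : Int) (h2 : Int) (m2 : Int) (out : Int) : Decidable (Spec_elapsed_time d2 h2 m2 out) := by unfold Spec_elapsed_time; infer_instance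

-- ===== CLAIM (what is proved, stated in full; the proofs are below) =====
def Claim_equal_elapsed_time : Prop := ∀ (d2 : Int) (h2 : Int) (m2 : Int), Dom_elapsed_time d2 h2 m2 → Spec_elapsed_time d2 h2 m2 (elapsed_time d2 h2 m2)

-- ===== LEMMAS AND PROOFS =====

-- Loop characterisation: from any valid clock state (0 ≤ h1 < 24, 0 ≤ m1 < 60)
-- with enough fuel, A's loop returns t + (target total − current total) when the
-- target is a valid clock time not before the current state, and -1 otherwise.
lemma elapsedLoopA_eq (d2 h2 m2 : Int) :
    ∀ (fuel : Nat) (d1 h1 m1 t : Int),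
    0 ≤ h1 → h1 < 24 → 0 ≤ m1 → m1 < 60 →
    ((d2 + 1) * 1440 - (d1 * 1440 + h1 * 60 + m1)).toNat < fuel →
    elapsedLoopA fuel d1 h1 m1 t d2 h2 m2 =
      if 0 ≤ h2 ∧ h2 < 24 ∧ 0 ≤ m2 ∧ m2 < 60 ∧
         d1 * 1440 + h1 * 60 + m1 ≤ d2 * 1440 + h2 * 60 + m2 then
        t + (d2 * 1440 + h2 * 60 + m2 - (d1 * 1440 + h1 * 60 + m1))
      else -1 := by
  intro fuel
  induction fuel with
  | zero => intro d1 h1 m1 t _ _ _ _ hf; omega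
  | succ fuel ih =>
    intro d1 h1 m1 t hh0 hh1 hm0 hm1 hf
    rw [elapsedLoopA]
    by_cases hret : d1 > d2 ∨ (d1 = d2 ∧ h1 > h2) ∨ (d1 = d2 ∧ h1 = h2 ∧ m1 > m2)
    · -- A returns -1: target is lexicographically behind the current state
      rw [if_pos hret, if_neg (by omega)]
    · rw [if_neg hret]
      by_cases heq : d1 = d2 ∧ h1 = h2 ∧ m1 = m2
      · -- A returns t: states equal componentwise
        rw [if_pos heq, if_pos (by omega)]; omega
      · rw [if_neg heq]
        by_cases hm : m1 + 1 ≥ 60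
        · by_cases hh : h1 + 1 ≥ 24
          · -- minute rollover + hour carry: advance to (d1 + 1, 0, 0)
            rw [if_pos hm, if_pos hh,
              ih (d1 + 1) 0 0 (t + 1) (by omega) (by omega) (by omega) (by omega) (by omega)]
            split_ifs <;> omega
          · -- minute rollover: advance to (d1, h1 + 1, 0)
            rw [if_pos hm, if_neg hh,
              ih d1 (h1 + 1) 0 (t + 1) (by omega) (by omega) (by omega) (by omega) (by omega)]
            split_ifs <;> omega
        · -- plain minute increment
          rw [if_neg hm,
            ih d1 h1 (m1 + 1) (t + 1) hh0 hh1 (by omega) (by omega) (by omega)]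
          split_ifs <;> omega

-- ===== VERDICT (by name: the statement is the Claim_ definition above) =====
theorem elapsed_time_spec : Claim_equal_elapsed_time := by
  intro d2 h2 m2 _
  unfold Spec_elapsed_time elapsed_time elapsed_time_alt
  dsimp only
  rw [elapsedLoopA_eq d2 h2 m2 _ 11 11 11 0 (by norm_num) (by norm_num) (by norm_num)
      (by norm_num) (by omega)]
  split_ifs with h1' h2' h2' <;> omega
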